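-- pv_equiv track=rewrite | github.com/wg-lux/agl-anonymizer | agl_anonymizer/agl_censor/phrase_combination.py | create_combined_phrases
-- ===== SOURCE A (Python) =====
-- def create_combined_phrases(ocr_texts_with_boxes):
--     combined_phrases = []
--     combined_box = None
--     phrase = ""
--
--     for text, box in ocr_texts_with_boxes:
--         # Ensure box is a tuple or list of four elements
--         if not isinstance(box, (tuple, list)) or len(box) != 4:
--             raise ValueError("Box must be a tuple or list of four elements")
--
--         if not phrase:
--             # Start a new phrase
--             phrase = text
--             combined_box = box
--         else:
--             # Add to existing phrase and update the box
--             phrase += " " + text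
--
--             # Ensure combined_box is valid before unpacking
--             if not isinstance(combined_box, (tuple, list)) or len(combined_box) != 4:
--                 raise ValueError("Combined box is not in the correct format")
--
--             startX, startY, endX, endY = combined_box
--             new_startX, new_startY, new_endX, new_endY = box
--             combined_box = (min(startX, new_startX), min(startY, new_startY),
--                             max(endX, new_endX), max(endY, new_endY))
--
--     # Append the final phrase and its box after the loop
--     if phrase:
--         combined_phrases.append((phrase, combined_box))
--
--     return combined_phrases
-- ===== SOURCE B (Python) =====
-- def create_combined_phrases(ocr_texts_with_boxes):
--     # One validation pass that also records the index of the first non-empty text.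
--     start = None
--     for i, (text, box) in enumerate(ocr_texts_with_boxes):
--         if not isinstance(box, (tuple, list)) or len(box) != 4:
--             raise ValueError("Box must be a tuple or list of four elements")
--         if start is None and text:
--             start = i
--     if start is None:
--         return []
--     tail = ocr_texts_with_boxes[start:]
--     phrase = " ".join(t for t, _ in tail)
--     box = (min(b[0] for _, b in tail),
--            min(b[1] for _, b in tail),
--            max(b[2] for _, b in tail),
--            max(b[3] for _, b in tail))
--     return [(phrase, box)]
-- ===== Notes on version B (the rewrite author's own statement) =====
-- stated objective: alternative
-- what changed: Replaces A's single loop with a running phrase/box accumulator by a validate pass that finds the first non-empty text, then a slice with a ' '.join for the phrase and column-wise min/max reductions for the combined box.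
import Mathlib
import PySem

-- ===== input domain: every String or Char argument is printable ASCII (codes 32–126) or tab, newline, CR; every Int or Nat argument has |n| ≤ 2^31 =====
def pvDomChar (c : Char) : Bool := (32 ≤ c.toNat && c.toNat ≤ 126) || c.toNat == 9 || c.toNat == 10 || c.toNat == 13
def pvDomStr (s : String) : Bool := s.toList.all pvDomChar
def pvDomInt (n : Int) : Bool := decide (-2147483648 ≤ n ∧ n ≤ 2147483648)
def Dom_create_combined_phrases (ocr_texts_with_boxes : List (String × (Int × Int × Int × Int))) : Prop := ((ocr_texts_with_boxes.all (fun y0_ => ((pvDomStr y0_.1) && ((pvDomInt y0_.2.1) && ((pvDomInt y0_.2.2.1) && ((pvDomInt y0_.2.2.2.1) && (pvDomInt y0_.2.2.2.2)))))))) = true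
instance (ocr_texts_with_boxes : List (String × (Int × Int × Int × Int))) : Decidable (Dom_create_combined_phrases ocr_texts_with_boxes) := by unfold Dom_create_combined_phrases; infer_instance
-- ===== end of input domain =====

-- B replaces A's single running-merge accumulator with a validate/find-start pass followed by a
-- slice, a join and column-wise min/max reductions (objective: alternative decomposition, same cost).

-- ===== PORT A =====
-- Loop state (phrase, combined_box); combined_box is Option because A starts it at None.
-- A's isinstance/len-4 box checks are always true under the type convention (box : Int×Int×Int×Int),
-- so neither ValueError branch is reachable and they are omitted.
def pvStepA (st : String × Option (Int × Int × Int × Int)) (tb : String × (Int × Int × Int × Int)) :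
    String × Option (Int × Int × Int × Int) :=
  if st.1 == "" then (tb.1, some tb.2)
  else
    (st.1 ++ " " ++ tb.1,
     match st.2 with
     | some (sx, sy, ex, ey) =>
         some (min sx tb.2.1, min sy tb.2.2.1, max ex tb.2.2.2.1, max ey tb.2.2.2.2)
     | none => none)

def create_combined_phrases (ocr_texts_with_boxes : List (String × (Int × Int × Int × Int))) :
    List (String × (Int × Int × Int × Int)) :=
  let st := ocr_texts_with_boxes.foldl pvStepA ("", none)
  -- final `if phrase:`; combined_box = None with a non-empty phrase is unreachable, getD is a dummy
  if st.1 == "" then [] else [(st.1, st.2.getD (0, 0, 0, 0))]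

-- ===== PORT B =====
-- Source B finds the first index with a truthy text and slices from it: that slice is exactly
-- dropWhile (text == ""). min/max over a non-empty generator = foldl from the first element.
def create_combined_phrases_alt (ocr_texts_with_boxes : List (String × (Int × Int × Int × Int))) :
    List (String × (Int × Int × Int × Int)) :=
  let tail := ocr_texts_with_boxes.dropWhile (fun tb => tb.1 == "")
  match tail with
  | [] => []
  | (t, b) :: tl =>
      let phrase := PySem.Str.join " " (t :: tl.map Prod.fst)
      let sx := (tl.map (fun tb => tb.2.1)).foldl min b.1
      let sy := (tl.map (fun tb => tb.2.2.1)).foldl min b.2.1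
      let ex := (tl.map (fun tb => tb.2.2.2.1)).foldl max b.2.2.1
      let ey := (tl.map (fun tb => tb.2.2.2.2)).foldl max b.2.2.2
      [(phrase, (sx, sy, ex, ey))]

-- ===== PRECONDITION & SPEC =====
def Spec_create_combined_phrases (ocr_texts_with_boxes : List (String × (Int × Int × Int × Int))) (out : List (String × (Int × Int × Int × Int))) : Prop := out = create_combined_phrases_alt ocr_texts_with_boxes
instance (ocr_texts_with_boxes : List (String × (Int × Int × Int × Int))) (out : List (String × (Int × Int × Int × Int))) : Decidable (Spec_create_combined_phrases ocr_texts_with_boxes out) := by unfold Spec_create_combined_phrases; infer_instance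

-- ===== CLAIM (what is proved, stated in full; the proofs are below) =====
def Claim_equal_create_combined_phrases : Prop := ∀ (ocr_texts_with_boxes : List (String × (Int × Int × Int × Int))), Dom_create_combined_phrases ocr_texts_with_boxes → Spec_create_combined_phrases ocr_texts_with_boxes (create_combined_phrases ocr_texts_with_boxes)

-- ===== LEMMAS AND PROOFS =====

theorem pv_append_ne_empty (p t : String) : (p ++ " " ++ t == "") = false := by
  rw [beq_eq_false_iff_ne]
  intro h
  have h2 := congrArg String.toList h
  simp [String.toList_append] at h2

-- while phrase is empty, the loop only overwrites the state; a list of all-empty texts ends empty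
theorem pv_foldl_all_empty (l : List (String × (Int × Int × Int × Int)))
    (ob : Option (Int × Int × Int × Int))
    (h : l.dropWhile (fun tb => tb.1 == "") = []) :
    (l.foldl pvStepA ("", ob)).1 = "" := by
  induction l generalizing ob with
  | nil => rfl
  | cons hd tl ih =>
      rw [List.dropWhile_cons] at h
      by_cases he : (hd.1 == "") = true
      · have he' : hd.1 = "" := by simpa using he
        rw [if_pos he] at h
        simp [List.foldl_cons, pvStepA, he']
        exact ih _ h
      · rw [if_neg he] at h
        exact absurd h (List.cons_ne_nil _ _)

theorem pv_dropWhile_head_false {α : Type} (p : α → Bool) (l : List α) (x : α) (xs : List α)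
    (h : l.dropWhile p = x :: xs) : p x = false := by
  induction l with
  | nil => simp at h
  | cons hd tl ih =>
      rw [List.dropWhile_cons] at h
      by_cases hp : p hd = true
      · simp [hp] at h; exact ih h
      · simp [hp] at h
        rw [← h.1]
        simpa using hp

-- folding from the empty phrase = folding the dropWhile'd tail from its (non-empty-text) head
theorem pv_foldl_start (l : List (String × (Int × Int × Int × Int)))
    (ob : Option (Int × Int × Int × Int)) (t : String) (b : Int × Int × Int × Int)
    (tl : List (String × (Int × Int × Int × Int)))
    (h : l.dropWhile (fun tb => tb.1 == "") = (t, b) :: tl) :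
    l.foldl pvStepA ("", ob) = tl.foldl pvStepA (t, some b) := by
  induction l generalizing ob with
  | nil => simp at h
  | cons hd tll ih =>
      rw [List.dropWhile_cons] at h
      by_cases he : (hd.1 == "") = true
      · have he' : hd.1 = "" := by simpa using he
        rw [if_pos he] at h
        simp [List.foldl_cons, pvStepA, he']
        exact ih _ h
      · rw [if_neg he] at h
        injection h with h1 h2
        subst h1; subst h2
        simp [List.foldl_cons, pvStepA]

-- once the phrase is non-empty, A's fold is the concat-fold paired with the box-merge fold
theorem pv_foldl_run (tl : List (String × (Int × Int × Int × Int))) (p : String)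
    (b : Int × Int × Int × Int) (hp : (p == "") = false) :
    tl.foldl pvStepA (p, some b) =
      (tl.foldl (fun s tb => s ++ " " ++ tb.1) p,
       some (tl.foldl (fun (acc : Int × Int × Int × Int) tb =>
         (min acc.1 tb.2.1, min acc.2.1 tb.2.2.1, max acc.2.2.1 tb.2.2.2.1,
          max acc.2.2.2 tb.2.2.2.2)) b)) := by
  induction tl generalizing p b with
  | nil => rfl
  | cons hd tll ih =>
      obtain ⟨sx, sy, ex, ey⟩ := b
      simp only [List.foldl_cons]
      rw [show pvStepA (p, some (sx, sy, ex, ey)) hd =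
          (p ++ " " ++ hd.1, some (min sx hd.2.1, min sy hd.2.2.1, max ex hd.2.2.2.1,
            max ey hd.2.2.2.2)) by simp [pvStepA, hp]]
      exact ih _ _ (pv_append_ne_empty p hd.1)

theorem pv_concat_fold_ne_empty (tl : List (String × (Int × Int × Int × Int))) (p : String)
    (hp : (p == "") = false) :
    (tl.foldl (fun s tb => s ++ " " ++ tb.1) p == "") = false := by
  induction tl generalizing p with
  | nil => exact hp
  | cons hd tll ih => exact ih _ (pv_append_ne_empty p hd.1)

theorem pv_join_shift (a b : String) (ts : List String) :
    PySem.Str.join " " ((a ++ " " ++ b) :: ts) = a ++ " " ++ PySem.Str.join " " (b :: ts) := by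
  rw [← String.toList_inj]
  simp only [String.toList_append, PySem.Str.toList_join, List.map_cons, String.toList_append]
  cases ts with
  | nil => simp [PySem.Chars.join_singleton]
  | cons c ts' =>
      rw [List.map_cons, PySem.Chars.join_cons_cons, PySem.Chars.join_cons_cons]
      simp [List.append_assoc]

theorem pv_join_cons (p q : String) (ts : List String) :
    PySem.Str.join " " (p :: q :: ts) = p ++ " " ++ PySem.Str.join " " (q :: ts) := by
  rw [← String.toList_inj]
  simp only [String.toList_append, PySem.Str.toList_join, List.map_cons]
  rw [PySem.Chars.join_cons_cons]

theorem pv_concat_eq_join (tl : List (String × (Int × Int × Int × Int))) (p : String) :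
    tl.foldl (fun s tb => s ++ " " ++ tb.1) p = PySem.Str.join " " (p :: tl.map Prod.fst) := by
  induction tl generalizing p with
  | nil =>
      rw [← String.toList_inj]
      simp [PySem.Str.toList_join, PySem.Chars.join_singleton]
  | cons hd tll ih =>
      simp only [List.foldl_cons, List.map_cons]
      rw [ih (p ++ " " ++ hd.1), pv_join_shift, pv_join_cons]

theorem pv_box_fold (tl : List (String × (Int × Int × Int × Int))) (b : Int × Int × Int × Int) :
    tl.foldl (fun (acc : Int × Int × Int × Int) tb =>
        (min acc.1 tb.2.1, min acc.2.1 tb.2.2.1, max acc.2.2.1 tb.2.2.2.1,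
         max acc.2.2.2 tb.2.2.2.2)) b =
      ((tl.map (fun tb => tb.2.1)).foldl min b.1,
       (tl.map (fun tb => tb.2.2.1)).foldl min b.2.1,
       (tl.map (fun tb => tb.2.2.2.1)).foldl max b.2.2.1,
       (tl.map (fun tb => tb.2.2.2.2)).foldl max b.2.2.2) := by
  induction tl generalizing b with
  | nil => rfl
  | cons hd tll ih =>
      obtain ⟨sx, sy, ex, ey⟩ := b
      simp only [List.foldl_cons, List.map_cons]
      exact ih _

-- ===== VERDICT (by name: the statement is the Claim_ definition above) =====
theorem create_combined_phrases_spec : Claim_equal_create_combined_phrases := by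
  intro l _
  unfold Spec_create_combined_phrases create_combined_phrases create_combined_phrases_alt
  cases h : l.dropWhile (fun tb => tb.1 == "") with
  | nil =>
      simp [pv_foldl_all_empty l none h]
  | cons hd tl =>
      obtain ⟨t, b⟩ := hd
      have ht : (t == "") = false := by
        simpa using pv_dropWhile_head_false (fun tb => tb.1 == "") l (t, b) tl h
      rw [pv_foldl_start l none t b tl h, pv_foldl_run tl t b ht]
      simp only [pv_concat_fold_ne_empty tl t ht, Bool.false_eq_true, if_false]
      simp [pv_concat_eq_join, pv_box_fold]
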